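-- pv_equiv track=rewrite | github.com/AdamNovak1804/FAPS_Project_Simple_LSB_encoder_decoder | decode.py | merge_nums
-- ===== SOURCE A (Python) =====
-- def merge_nums(out, length):
--     out_str = list()
--     char = 0
--     j = 0
--     for i in range(0, length):
--         if i % 8 == 0 and i != 0:
--             char = int('{:08b}'.format(char)[::-1], 2)
--             out_str.append(chr(char))
--             char = 0
--             j = 0
--         if out[i]:
--             char |= 1 << j
--         j += 1
--
--     char = int('{:08b}'.format(char)[::-1], 2)
--     out_str.append(chr(char))
--     return out_str
-- ===== SOURCE B (Python) =====
-- def merge_nums(out, length):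
--     num_chars = max(1, (length + 7) // 8)
--     out_str = []
--     for k in range(num_chars):
--         char = 0
--         for j in range(8):
--             idx = 8 * k + j
--             if idx < length and out[idx]:
--                 char |= 1 << (7 - j)
--         out_str.append(chr(char))
--     return out_str
-- ===== Notes on version B (the rewrite author's own statement) =====
-- stated objective: alternative
-- what changed: Replaces A's single flat pass with its modulo-8 flush, low-order bit accumulation and per-byte format/reverse/parse round-trip by a computed output count max(1,(length+7)//8) and a two-level chunked loop that ORs each bit directly into its reversed position 1<<(7-j), appending each byte as it is finished.
import Mathlib
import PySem

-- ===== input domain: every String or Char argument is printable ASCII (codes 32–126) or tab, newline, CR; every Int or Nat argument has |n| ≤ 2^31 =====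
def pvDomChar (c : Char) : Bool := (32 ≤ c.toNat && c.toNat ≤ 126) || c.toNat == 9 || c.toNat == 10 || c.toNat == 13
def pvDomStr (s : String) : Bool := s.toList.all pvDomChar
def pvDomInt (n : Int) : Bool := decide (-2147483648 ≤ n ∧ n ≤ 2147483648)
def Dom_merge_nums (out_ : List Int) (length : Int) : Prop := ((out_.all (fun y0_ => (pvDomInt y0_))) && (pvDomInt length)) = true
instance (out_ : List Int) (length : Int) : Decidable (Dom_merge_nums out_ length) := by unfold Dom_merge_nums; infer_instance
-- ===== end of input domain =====

-- B packs each bit directly into its reversed position per 8-bit chunk instead of A's flat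
-- pass with modulo-8 flushes and a per-byte format/reverse/parse round-trip (alternative).

-- ===== PORT A =====
-- chr(c): exact for 0 ≤ c < 0x110000 (here c is always 0..255)
def pvChr (c : Int) : String := String.ofList [Char.ofNat c.toNat]

-- int('{:08b}'.format(c)[::-1], 2): exact for 0 ≤ c (always 0..255 here);
-- '{:08b}' = binary digits left-padded with '0' to width 8, [::-1] = reverse
def pyRevByte (c : Int) : Int :=
  (PySem.Int.ofCharsBase? ((PySem.Chars.zfill (PySem.Int.toBinChars c) 8).reverse) 2).getD 0

-- one iteration of A's loop body; out[i] is in range under Pre_, pyGetD stands in for the raising lookup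
def mergeStepA (out_ : List Int) (s : List String × Int × Int) (i : Int) : List String × Int × Int :=
  let s := if PySem.Int.mod i 8 = 0 ∧ i ≠ 0 then
      (s.1 ++ [pvChr (pyRevByte s.2.1)], (0 : Int), (0 : Int)) else s
  ( s.1,
    (if PySem.List.pyGetD out_ i 0 ≠ 0 then PySem.Int.bor s.2.1 (1 <<< s.2.2.toNat) else s.2.1),
    s.2.2 + 1 )

def merge_nums (out_ : List Int) (length : Int) : List String :=
  let r := (PySem.List.pyRange 0 length 1).foldl (mergeStepA out_) ([], 0, 0)
  r.1 ++ [pvChr (pyRevByte r.2.1)]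

-- ===== PORT B =====
-- one iteration of B's inner loop; out[idx] is in range under Pre_ (the idx < length guard short-circuits)
def mergeStepB (out_ : List Int) (length k : Int) (c : Int) (j : Int) : Int :=
  let idx := 8 * k + j
  if idx < length ∧ PySem.List.pyGetD out_ idx 0 ≠ 0 then
    PySem.Int.bor c (1 <<< (7 - j).toNat) else c

def merge_nums_alt (out_ : List Int) (length : Int) : List String :=
  let num_chars := max 1 (PySem.Int.floordiv (length + 7) 8)
  (PySem.List.pyRange 0 num_chars 1).foldl (fun res k =>
    res ++ [pvChr ((PySem.List.pyRange 0 8 1).foldl (mergeStepB out_ length k) 0)]) []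

-- ===== PRECONDITION & SPEC =====
-- A reads out[i] for every 0 ≤ i < length, so it raises IndexError iff length > len(out): exclude exactly that.
def Pre_merge_nums (out_ : List Int) (length : Int) : Prop := length ≤ (out_.length : Int)
instance (out_ : List Int) (length : Int) : Decidable (Pre_merge_nums out_ length) := by
  unfold Pre_merge_nums; infer_instance
def pvWitness_merge_nums : List Int × Int := ([1, 0, 1], 3)

def Spec_merge_nums (out_ : List Int) (length : Int) (out : List String) : Prop := out = merge_nums_alt out_ length
instance (out_ : List Int) (length : Int) (out : List String) : Decidable (Spec_merge_nums out_ length out) := by unfold Spec_merge_nums; infer_instance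

-- ===== CLAIM (what is proved, stated in full; the proofs are below) =====
def Claim_equal_merge_nums : Prop := ∀ (out_ : List Int) (length : Int), Dom_merge_nums out_ length → Pre_merge_nums out_ length → Spec_merge_nums out_ length (merge_nums out_ length)

-- ===== LEMMAS AND PROOFS =====

-- bit values of a chunk, low-order first (A's accumulator) / reversed (B's accumulator), over Bool
def lowB (bits : List Bool) (j : Nat) : Int :=
  match bits with
  | [] => 0
  | b :: r => (if b then 2^j else 0) + lowB r (j+1)

def highB (bits : List Bool) (j : Nat) : Int :=
  match bits with
  | [] => 0
  | b :: r => (if b then 2^(7-j) else 0) + highB r (j+1)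

-- the same over the raw Int entries (truthiness = ≠ 0)
def lowV (bs : List Int) (j : Nat) : Int :=
  match bs with
  | [] => 0
  | b :: r => (if b ≠ 0 then 2^j else 0) + lowV r (j+1)

def highV (bs : List Int) (j : Nat) : Int :=
  match bs with
  | [] => 0
  | b :: r => (if b ≠ 0 then 2^(7-j) else 0) + highV r (j+1)

-- common reference result: one char per 8-entry chunk of the truncated input (≥ 1 char)
def ref (bs : List Int) : List String :=
  pvChr (highV (bs.take 8) 0) :: (if _h : bs.length ≤ 8 then [] else ref (bs.drop 8))
termination_by bs.length
decreasing_by simp; omega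

def finishA (r : List String × Int × Int) : List String := r.1 ++ [pvChr (pyRevByte r.2.1)]

theorem natLorPowLt (j : Nat) : ∀ c, c < 2^j → c ||| 2^j = c + 2^j := by
  induction j with
  | zero => intro c hc; interval_cases c; decide
  | succ j ih =>
    intro c hc
    have hb := Nat.bit_decide_mod_two_eq_one_shiftRight_one c
    have h2 : (2:Nat)^(j+1) = Nat.bit false (2^j) := by simp [Nat.bit_val]; ring
    have hP : c < 2 * 2^j := by rw [pow_succ] at hc; omega
    have hdiv : c >>> 1 < 2^j := by rw [Nat.shiftRight_one]; omega
    rw [← hb, h2, Nat.lor_bit, ih _ hdiv]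
    by_cases h : c % 2 = 1 <;>
      simp [h, Nat.bit_val, Nat.shiftRight_one] <;> ring

theorem natLorPowDvd (j : Nat) : ∀ c, 2^(j+1) ∣ c → c ||| 2^j = c + 2^j := by
  induction j with
  | zero =>
    intro c hc
    obtain ⟨d, rfl⟩ := hc
    have h1 : 2^(0+1)*d = Nat.bit false d := by simp [Nat.bit_val]
    have h2 : (2:Nat)^0 = Nat.bit true 0 := by decide
    rw [h1, h2, Nat.lor_bit]
    simp [Nat.bit_val]
  | succ j ih =>
    intro c hc
    obtain ⟨d, rfl⟩ := hc
    have h1 : 2^(j+1+1)*d = Nat.bit false (2^(j+1)*d) := by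
      simp [Nat.bit_val]; ring
    rw [h1]
    nth_rewrite 2 [show (2:Nat)^(j+1) = Nat.bit false (2^j) by simp [Nat.bit_val]; ring]
    rw [Nat.lor_bit, ih _ ⟨d, rfl⟩]
    simp [Nat.bit_val]
    rw [pow_succ]
    ring

theorem intToNatLtPow (c : Int) (n : Nat) (h : c < (2:Int)^n) : c.toNat < 2^n := by
  exact_mod_cast Int.toNat_lt' (by positivity) |>.mpr (by push_cast; omega)

theorem intBorPowLt (c : Int) (j : Nat) (h0 : 0 ≤ c) (h1 : c < 2^j) :
    PySem.Int.bor c (1 <<< j) = c + 2^j := by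
  rw [show ((1 <<< j : Nat) : Int) = ((2^j : Nat) : Int) by rw [Nat.one_shiftLeft]]
  rw [show ((2:Int)^j) = ((2^j : Nat) : Int) by push_cast; ring]
  rw [show c = ((c.toNat : Nat) : Int) from (Int.toNat_of_nonneg h0).symm]
  rw [PySem.Int.bor_natCast]
  rw [natLorPowLt j c.toNat (intToNatLtPow c j h1)]
  push_cast [Int.toNat_of_nonneg h0]
  ring

theorem intBorPowDvd (c : Int) (j : Nat) (h0 : 0 ≤ c) (h1 : (2:Int)^(j+1) ∣ c) :
    PySem.Int.bor c (1 <<< j) = c + 2^j := by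
  rw [show ((1 <<< j : Nat) : Int) = ((2^j : Nat) : Int) by rw [Nat.one_shiftLeft]]
  obtain ⟨d, rfl⟩ := h1
  have hd : 0 ≤ d := by
    by_contra hneg
    have hlt : d < 0 := by omega
    have h2 : (0:Int) < 2^(j+1) := by positivity
    nlinarith
  have hkey : ((2:Int)^(j+1) * d).toNat = 2^(j+1) * d.toNat := by
    rw [← Int.toNat_natCast (2^(j+1) * d.toNat)]
    congr 1
    push_cast [Int.toNat_of_nonneg hd]
    ring
  rw [show ((2:Int)^j) = ((2^j : Nat) : Int) by push_cast; ring]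
  rw [show (2:Int)^(j+1) * d = ((((2:Int)^(j+1) * d).toNat : Nat) : Int) from (Int.toNat_of_nonneg h0).symm]
  rw [PySem.Int.bor_natCast]
  rw [natLorPowDvd j _ (by rw [hkey]; exact ⟨d.toNat, rfl⟩)]
  push_cast [Int.toNat_of_nonneg h0]
  ring

theorem revByte8 : ∀ b0 b1 b2 b3 b4 b5 b6 b7 : Bool,
    pyRevByte (lowB [b0,b1,b2,b3,b4,b5,b6,b7] 0) = highB [b0,b1,b2,b3,b4,b5,b6,b7] 0 := by
  decide

theorem lowB_pad (u : List Bool) (n : Nat) : ∀ j, lowB (u ++ List.replicate n false) j = lowB u j := by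
  induction u with
  | nil =>
    induction n with
    | zero => intro j; rfl
    | succ n ihn =>
      intro j
      simp only [List.nil_append] at ihn ⊢
      rw [List.replicate_succ]
      show (if (false : Bool) then (2:Int)^j else 0) + lowB (List.replicate n false) (j+1) = lowB [] j
      rw [ihn (j+1)]
      simp [lowB]
  | cons b r ih =>
    intro j
    show (if b then (2:Int)^j else 0) + lowB (r ++ List.replicate n false) (j+1) = _
    rw [ih (j+1)]
    rfl

theorem highB_pad (u : List Bool) (n : Nat) : ∀ j, highB (u ++ List.replicate n false) j = highB u j := by
  induction u with
  | nil =>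
    induction n with
    | zero => intro j; rfl
    | succ n ihn =>
      intro j
      simp only [List.nil_append] at ihn ⊢
      rw [List.replicate_succ]
      show (if (false : Bool) then (2:Int)^(7-j) else 0) + highB (List.replicate n false) (j+1) = highB [] j
      rw [ihn (j+1)]
      simp [highB]
  | cons b r ih =>
    intro j
    show (if b then (2:Int)^(7-j) else 0) + highB (r ++ List.replicate n false) (j+1) = _
    rw [ih (j+1)]
    rfl

theorem lowV_eq_lowB (bs : List Int) : ∀ j, lowV bs j = lowB (bs.map (fun x => decide (x ≠ 0))) j := by
  induction bs with
  | nil => intro j; rfl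
  | cons b r ih =>
    intro j
    show (if b ≠ 0 then (2:Int)^j else 0) + lowV r (j+1) = (if decide (b ≠ 0) then (2:Int)^j else 0) + _
    rw [ih (j+1)]
    split_ifs <;> simp_all

theorem highV_eq_highB (bs : List Int) : ∀ j, highV bs j = highB (bs.map (fun x => decide (x ≠ 0))) j := by
  induction bs with
  | nil => intro j; rfl
  | cons b r ih =>
    intro j
    show (if b ≠ 0 then (2:Int)^(7-j) else 0) + highV r (j+1) = (if decide (b ≠ 0) then (2:Int)^(7-j) else 0) + _
    rw [ih (j+1)]
    split_ifs <;> simp_all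

theorem revByteLen8 (u : List Bool) (hu : u.length = 8) : pyRevByte (lowB u 0) = highB u 0 := by
  rcases u with _ | ⟨b0, _ | ⟨b1, _ | ⟨b2, _ | ⟨b3, _ | ⟨b4, _ | ⟨b5, _ | ⟨b6, _ | ⟨b7, t⟩⟩⟩⟩⟩⟩⟩⟩ <;>
    simp_all
  rcases t with _ | ⟨x, t⟩
  · exact revByte8 b0 b1 b2 b3 b4 b5 b6 b7
  · simp at hu

theorem revLow (bs : List Int) (h : bs.length ≤ 8) : pyRevByte (lowV bs 0) = highV bs 0 := by
  set u := bs.map (fun x => decide (x ≠ 0)) with hu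
  have hlen : u.length = bs.length := by simp [hu]
  have hpad := revByteLen8 (u ++ List.replicate (8 - u.length) false) (by simp; omega)
  rw [lowB_pad u _ 0, highB_pad u _ 0] at hpad
  rw [lowV_eq_lowB, highV_eq_highB]
  exact hpad

theorem chunkCons (out_ : List Int) (a : Nat) (m : Nat) (j : Nat) :
    (if out_.getD a 0 ≠ 0 then (2:Int)^j else 0) + lowV ((out_.drop (a+1)).take m) (j+1)
      = lowV ((out_.drop a).take (m+1)) j := by
  by_cases ha : a < out_.length
  · rw [List.drop_eq_getElem_cons ha, List.take_succ_cons, List.getD_eq_getElem out_ 0 ha]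
    rfl
  · rw [List.drop_eq_nil_of_le (by omega), List.drop_eq_nil_of_le (by omega),
      List.getD_eq_default out_ 0 (by omega)]
    simp [lowV]

theorem fillA (out_ : List Int) (m : Nat) : ∀ (a : Nat) (acc : List String) (c : Int) (j : Nat),
    (∀ i : Nat, a ≤ i → i < a + m → ¬(i % 8 = 0 ∧ i ≠ 0)) →
    0 ≤ c → c < 2^j →
    (PySem.List.pyRange (a : Int) ((a + m : Nat) : Int) 1).foldl (mergeStepA out_) (acc, c, (j : Int)) =
      (acc, c + lowV ((out_.drop a).take m) j, ((j + m : Nat) : Int)) := by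
  induction m with
  | zero =>
    intro a acc c j hnf h0 h1
    rw [PySem.List.pyRange_one_eq_nil (by simp)]
    simp [lowV]
  | succ m ih =>
    intro a acc c j hnf h0 h1
    rw [PySem.List.pyRange_one_cons (by push_cast; omega), List.foldl_cons]
    have hmod : PySem.Int.mod (a:Int) 8 = ((a % 8 : Nat) : Int) := by
      exact_mod_cast PySem.Int.mod_natCast a 8
    have hflush : ¬(PySem.Int.mod (a:Int) 8 = 0 ∧ (a:Int) ≠ 0) := by
      have := hnf a (le_refl a) (by omega)
      rw [hmod]
      push_cast
      omega
    have hbit : (0:Int) ≤ (if out_.getD a 0 ≠ 0 then (2:Int)^j else 0) ∧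
        (if out_.getD a 0 ≠ 0 then (2:Int)^j else 0) ≤ 2^j := by
      constructor
      · split_ifs <;> positivity
      · split_ifs
        · exact le_rfl
        · positivity
    have hstep : mergeStepA out_ (acc, c, (j:Int)) (a:Int) =
        (acc, c + (if out_.getD a 0 ≠ 0 then (2:Int)^j else 0), ((j+1 : Nat) : Int)) := by
      simp only [mergeStepA, if_neg hflush]
      simp only [PySem.List.pyGetD_natCast, Int.toNat_natCast]
      refine Prod.ext rfl (Prod.ext ?_ (by push_cast; ring))
      show (if out_.getD a 0 ≠ 0 then PySem.Int.bor c (1 <<< j) else c) = _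
      split_ifs with hb
      · exact intBorPowLt c j h0 h1
      · ring
    rw [hstep]
    rw [show ((a:Int)+1) = ((a+1 : Nat):Int) by push_cast; ring,
        show ((a+(m+1):Nat):Int) = (((a+1)+m : Nat):Int) by push_cast; ring]
    rw [ih (a+1) acc _ (j+1) (fun i h1' h2' => hnf i (by omega) (by omega))
        (by have := hbit.1; omega)
        (by have h2 : (2:Int)^(j+1) = 2^j + 2^j := by ring
            have := hbit.2
            omega)]
    refine Prod.ext rfl (Prod.ext ?_ (by push_cast; ring))
    show c + (if out_.getD a 0 ≠ 0 then (2:Int)^j else 0) + lowV ((out_.drop (a+1)).take m) (j+1) = _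
    rw [add_assoc, chunkCons]

theorem flushFill (out_ : List Int) (t : Nat) (ht : 1 ≤ t) (mm : Nat) (hmm : mm ≤ 7)
    (acc : List String) (c : Int) :
    (PySem.List.pyRange ((8*t : Nat) : Int) ((8*t + (mm+1) : Nat) : Int) 1).foldl
        (mergeStepA out_) (acc, c, ((8 : Nat) : Int)) =
      (acc ++ [pvChr (pyRevByte c)], lowV ((out_.drop (8*t)).take (mm+1)) 0, ((0 + (mm+1) : Nat) : Int)) := by
  rw [PySem.List.pyRange_one_cons (by push_cast; omega), List.foldl_cons]
  have hmod : PySem.Int.mod ((8*t : Nat):Int) 8 = 0 := by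
    have h := PySem.Int.mod_natCast (8*t) 8
    rw [show (8*t) % 8 = 0 by omega] at h
    exact_mod_cast h
  have hstep : mergeStepA out_ (acc, c, ((8:Nat):Int)) ((8*t : Nat):Int) =
      (acc ++ [pvChr (pyRevByte c)], (if out_.getD (8*t) 0 ≠ 0 then (2:Int)^0 else 0), ((0+1 : Nat) : Int)) := by
    simp only [mergeStepA,
      if_pos (⟨hmod, by push_cast; omega⟩ : PySem.Int.mod ((8*t : Nat):Int) 8 = 0 ∧ ((8*t : Nat):Int) ≠ 0)]
    simp only [PySem.List.pyGetD_natCast]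
    refine Prod.ext rfl (Prod.ext ?_ (by push_cast; try ring))
    show (if out_.getD (8*t) 0 ≠ 0 then PySem.Int.bor 0 ((1 <<< (0:Int).toNat : Nat) : Int) else 0)
        = (if out_.getD (8*t) 0 ≠ 0 then (2:Int)^0 else 0)
    split_ifs
    · decide
    · rfl
  rw [hstep]
  rw [show (((8*t : Nat)):Int)+1 = ((8*t+1 : Nat):Int) by push_cast; ring,
      show ((8*t+(mm+1):Nat):Int) = (((8*t+1)+mm : Nat):Int) by push_cast; ring]
  rw [fillA out_ mm (8*t+1) _ _ 1 (fun i h1' h2' => by omega)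
      (by split_ifs <;> norm_num)
      (by split_ifs <;> norm_num)]
  refine Prod.ext rfl (Prod.ext ?_ (by push_cast; ring))
  show (if out_.getD (8*t) 0 ≠ 0 then (2:Int)^0 else 0) + lowV ((out_.drop (8*t+1)).take mm) (0+1) = _
  rw [chunkCons]

theorem peelA (out_ : List Int) : ∀ (m : Nat), 1 ≤ m → ∀ (t : Nat), 1 ≤ t →
    8*t + m ≤ out_.length → ∀ (acc : List String) (c : Int),
    finishA ((PySem.List.pyRange ((8*t : Nat) : Int) ((8*t + m : Nat) : Int) 1).foldl
        (mergeStepA out_) (acc, c, ((8 : Nat) : Int))) =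
      acc ++ pvChr (pyRevByte c) :: ref ((out_.drop (8*t)).take m) := by
  intro m
  induction m using Nat.strong_induction_on with
  | _ m IH =>
  intro hm t ht hlen acc c
  by_cases h8 : m ≤ 8
  · obtain ⟨mm, rfl⟩ : ∃ mm, m = mm + 1 := ⟨m - 1, by omega⟩
    rw [flushFill out_ t ht mm (by omega)]
    have hclen : ((out_.drop (8*t)).take (mm+1)).length ≤ 8 := by
      simp only [List.length_take, List.length_drop]
      omega
    simp only [finishA]
    rw [revLow _ hclen]
    rw [ref]
    rw [dif_pos hclen, List.take_of_length_le hclen]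
    simp
  · have hsplit := PySem.List.pyRange_one_append ((8*t : Nat) : Int) ((8*t + 8 : Nat) : Int)
      ((8*t + m : Nat) : Int) (by push_cast; omega) (by push_cast; omega)
    rw [hsplit, List.foldl_append]
    rw [show ((8*t+8 : Nat):Int) = ((8*t + (7+1) : Nat):Int) by norm_num]
    rw [flushFill out_ t ht 7 (by omega)]
    rw [show ((0+(7+1) : Nat):Int) = ((8:Nat):Int) by norm_num]
    rw [show ((8*t+(7+1) : Nat):Int) = ((8*(t+1) : Nat):Int) by push_cast; ring,
        show ((8*t+m : Nat):Int) = ((8*(t+1) + (m-8) : Nat):Int) by push_cast; omega]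
    rw [IH (m-8) (by omega) (by omega) (t+1) (by omega) (by omega)]
    have hbig : ¬ ((out_.drop (8*t)).take m).length ≤ 8 := by
      simp only [List.length_take, List.length_drop]
      omega
    conv_rhs => rw [ref]
    rw [dif_neg hbig]
    have htk : ((out_.drop (8*t)).take m).take 8 = (out_.drop (8*t)).take 8 := by
      rw [List.take_take]
      congr 1
      omega
    have hdr : ((out_.drop (8*t)).take m).drop 8 = (out_.drop (8*(t+1))).take (m-8) := by
      rw [List.drop_take, List.drop_drop]
      congr 2
    rw [htk, hdr]
    have hc8 : ((out_.drop (8*t)).take (7+1)).length ≤ 8 := by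
      simp only [List.length_take, List.length_drop]
      omega
    rw [revLow _ hc8]
    simp

theorem A_eq_ref (out_ : List Int) (length : Int) (hpre : length ≤ (out_.length : Int)) :
    merge_nums out_ length = ref (out_.take length.toNat) := by
  set m := length.toNat with hm
  have hrange : PySem.List.pyRange 0 length 1 = PySem.List.pyRange 0 ((m : Nat) : Int) 1 := by
    by_cases hl : 0 ≤ length
    · congr 1
      simp [hm, Int.toNat_of_nonneg hl]
    · rw [PySem.List.pyRange_one_eq_nil (by omega),
        PySem.List.pyRange_one_eq_nil (by simp [hm, Int.toNat_of_nonpos (by omega : length ≤ 0)])]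
  simp only [merge_nums]
  rw [hrange]
  by_cases h8 : m ≤ 8
  · have hf := fillA out_ m 0 [] 0 0 (fun i h1' h2' => by omega) le_rfl (by norm_num)
    simp only [Nat.cast_zero, Nat.zero_add, List.drop_zero] at hf
    rw [hf]
    have hclen : (out_.take m).length ≤ 8 := by
      simp only [List.length_take]
      omega
    show [] ++ [pvChr (pyRevByte (0 + lowV (out_.take m) 0))] = _
    rw [zero_add, revLow _ hclen, ref, dif_pos hclen, List.take_of_length_le hclen]
    simp
  · have hlen : m ≤ out_.length := by omega
    have hsplit := PySem.List.pyRange_one_append (0 : Int) (8 : Int)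
      ((m : Nat) : Int) (by norm_num) (by omega)
    rw [hsplit, List.foldl_append]
    have hf := fillA out_ 8 0 [] 0 0 (fun i h1' h2' => by omega) le_rfl (by norm_num)
    simp only [Nat.cast_zero, Nat.zero_add, List.drop_zero] at hf
    rw [show ((8:Nat):Int) = (8:Int) by norm_num] at hf
    rw [hf]
    have hpeel := peelA out_ (m-8) (by omega) 1 le_rfl (by omega) [] (0 + lowV (out_.take 8) 0)
    rw [show ((8*1 : Nat):Int) = (8:Int) by norm_num,
        show ((8*1 + (m-8) : Nat):Int) = ((m : Nat) : Int) by push_cast; omega] at hpeel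
    have hfin : ∀ r : List String × Int × Int, r.1 ++ [pvChr (pyRevByte r.2.1)] = finishA r :=
      fun _ => rfl
    rw [hfin, hpeel]
    conv_rhs => rw [ref]
    rw [dif_neg (by simp only [List.length_take]; omega)]
    have htk : (out_.take m).take 8 = out_.take 8 := by
      rw [List.take_take]
      congr 1
      omega
    have hdr : (out_.take m).drop 8 = (out_.drop (8*1)).take (m-8) := by
      rw [List.drop_take]
    rw [htk, hdr, zero_add, revLow _ (by simp)]
    simp

theorem chunkConsB (out_ : List Int) (length : Int) (hpre : length ≤ (out_.length : Int))
    (p : Nat) (r : Nat) (j : Nat) :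
    (if ((p : Nat) : Int) < length ∧ out_.getD p 0 ≠ 0 then (2:Int)^(7-j) else 0)
      + highV (((out_.take length.toNat).drop (p+1)).take r) (j+1)
      = highV (((out_.take length.toNat).drop p).take (r+1)) j := by
  set bs := out_.take length.toNat with hbs
  by_cases hlt : ((p : Nat) : Int) < length
  · have hpos : 0 < length := by omega
    have hp1 : p < length.toNat := by omega
    have hp2 : p < out_.length := by omega
    have hpb : p < bs.length := by simp [hbs]; omega
    rw [List.drop_eq_getElem_cons hpb, List.take_succ_cons]
    have hbv : bs[p] = out_[p]'hp2 := by simp [hbs]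
    rw [List.getD_eq_getElem out_ 0 hp2]
    show _ = (if bs[p] ≠ 0 then (2:Int)^(7-j) else 0) + highV ((bs.drop (p+1)).take r) (j+1)
    rw [hbv]
    congr 1
    simp only [hlt, true_and]
  · rw [if_neg (by intro hcon; exact hlt hcon.1)]
    have hd1 : bs.drop p = [] := by
      apply List.drop_eq_nil_of_le
      simp [hbs]
      omega
    have hd2 : bs.drop (p+1) = [] := by
      apply List.drop_eq_nil_of_le
      simp [hbs]
      omega
    rw [hd1, hd2]
    simp [highV]

theorem fillB (out_ : List Int) (length : Int) (hpre : length ≤ (out_.length : Int)) (k : Nat) :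
    ∀ (r : Nat) (j0 : Nat) (c : Int), j0 + r ≤ 8 → 0 ≤ c → (2:Int)^(8-j0) ∣ c →
    (PySem.List.pyRange ((j0 : Nat) : Int) ((j0 + r : Nat) : Int) 1).foldl
        (mergeStepB out_ length (k : Int)) c
      = c + highV (((out_.take length.toNat).drop (8*k+j0)).take r) j0 := by
  intro r
  induction r with
  | zero =>
    intro j0 c hj h0 hd
    rw [PySem.List.pyRange_one_eq_nil (by simp)]
    simp [highV]
  | succ r ih =>
    intro j0 c hj h0 hd
    rw [PySem.List.pyRange_one_cons (by push_cast; omega), List.foldl_cons]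
    have hstep : mergeStepB out_ length (k : Int) c ((j0 : Nat) : Int) =
        c + (if ((8*k+j0 : Nat) : Int) < length ∧ out_.getD (8*k+j0) 0 ≠ 0 then (2:Int)^(7-j0) else 0) := by
      simp only [mergeStepB]
      rw [show (8*(k:Int) + ((j0:Nat):Int)) = ((8*k+j0 : Nat) : Int) by push_cast; ring]
      simp only [PySem.List.pyGetD_natCast]
      split_ifs with hc
      · rw [show ((7:Int) - ((j0:Nat):Int)).toNat = 7 - j0 by omega]
        exact intBorPowDvd c (7-j0) h0 (by rw [show 7-j0+1 = 8-j0 by omega]; exact hd)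
      · ring
    rw [hstep]
    have hb0 : (0:Int) ≤ (if ((8*k+j0 : Nat) : Int) < length ∧ out_.getD (8*k+j0) 0 ≠ 0
        then (2:Int)^(7-j0) else 0) := by
      split_ifs <;> positivity
    have hdvd : (2:Int)^(8-(j0+1)) ∣ c + (if ((8*k+j0 : Nat) : Int) < length ∧ out_.getD (8*k+j0) 0 ≠ 0
        then (2:Int)^(7-j0) else 0) := by
      have hd1 : (2:Int)^(7-j0) ∣ c := dvd_trans (pow_dvd_pow 2 (by omega)) hd
      have hd2 : (2:Int)^(7-j0) ∣ (if ((8*k+j0 : Nat) : Int) < length ∧ out_.getD (8*k+j0) 0 ≠ 0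
          then (2:Int)^(7-j0) else 0) := by split_ifs <;> simp
      rw [show 8-(j0+1) = 7-j0 by omega]
      exact dvd_add hd1 hd2
    rw [show (((j0 : Nat)):Int)+1 = ((j0+1 : Nat):Int) by push_cast; ring,
        show ((j0+(r+1):Nat):Int) = (((j0+1)+r : Nat):Int) by push_cast; ring]
    rw [ih (j0+1) _ (by omega) (by omega) hdvd]
    rw [add_assoc, show 8*k+(j0+1) = (8*k+j0)+1 by ring,
      chunkConsB out_ length hpre (8*k+j0) r j0]

theorem refB_eq : ∀ (n : Nat) (bs : List Int), bs.length = n →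
    (List.range (max 1 ((bs.length + 7)/8))).map
        (fun k => pvChr (highV ((bs.drop (8*k)).take 8) 0)) = ref bs := by
  intro n
  induction n using Nat.strong_induction_on with
  | _ n IH =>
  intro bs hn
  by_cases h8 : bs.length ≤ 8
  · rw [show max 1 ((bs.length + 7)/8) = 1 by omega]
    rw [List.range_one]
    rw [ref, dif_pos h8]
    simp
  · have hq : max 1 ((bs.length + 7)/8) = ((bs.length + 7)/8 - 1) + 1 := by omega
    rw [hq, List.range_succ_eq_map]
    rw [List.map_cons, List.map_map]
    rw [ref, dif_neg h8]
    refine congrArg₂ _ (by simp) ?_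
    have harg : ∀ k : Nat, (bs.drop (8*(k+1))).take 8 = ((bs.drop 8).drop (8*k)).take 8 := by
      intro k
      rw [List.drop_drop]
      congr 2
      ring
    have hcnt : (bs.length + 7)/8 - 1 = max 1 (((bs.drop 8).length + 7)/8) := by
      simp only [List.length_drop]
      omega
    calc (List.range ((bs.length + 7)/8 - 1)).map
          ((fun k => pvChr (highV ((bs.drop (8*k)).take 8) 0)) ∘ (fun n => n + 1))
        = (List.range (max 1 (((bs.drop 8).length + 7)/8))).map
            (fun k => pvChr (highV (((bs.drop 8).drop (8*k)).take 8) 0)) := by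
          rw [← hcnt]
          refine List.map_congr_left ?_
          intro k _
          simp only [Function.comp_apply]
          rw [harg k]
      _ = ref (bs.drop 8) := IH (bs.drop 8).length (by simp; omega) (bs.drop 8) rfl

theorem innerB (out_ : List Int) (length : Int) (hpre : length ≤ (out_.length : Int)) (k : Nat) :
    (PySem.List.pyRange 0 8 1).foldl (mergeStepB out_ length (k : Int)) 0
      = highV (((out_.take length.toNat).drop (8*k)).take 8) 0 := by
  have h := fillB out_ length hpre k 8 0 0 (by omega) le_rfl (by simp)
  simp only [Nat.cast_zero, Nat.zero_add, Nat.add_zero] at h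
  rw [show ((8:Nat):Int) = (8:Int) by norm_num] at h
  rw [h]
  ring

theorem B_eq_ref (out_ : List Int) (length : Int) (hpre : length ≤ (out_.length : Int)) :
    merge_nums_alt out_ length = ref (out_.take length.toNat) := by
  simp only [merge_nums_alt]
  rw [PySem.List.foldl_append_singleton_eq_map]
  set K := max 1 (PySem.Int.floordiv (length + 7) 8) with hK
  have hKr : PySem.List.pyRange 0 K 1 = (List.range K.toNat).map (fun n : Nat => (n : Int)) := by
    rw [PySem.List.pyRange_one]
    simp
  rw [hKr, List.map_map]
  rw [List.map_congr_left (fun n _ => by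
    simp only [Function.comp_apply]
    rw [innerB out_ length hpre n])]
  have hKt : K.toNat = max 1 (((out_.take length.toNat).length + 7)/8) := by
    by_cases hl : 0 ≤ length
    · have hmin : (out_.take length.toNat).length = length.toNat := by
        simp only [List.length_take]
        omega
      have hfd : PySem.Int.floordiv (length+7) 8 = (((length.toNat+7)/8 : Nat) : Int) := by
        rw [show length + 7 = ((length.toNat + 7 : Nat) : Int) by omega]
        exact_mod_cast PySem.Int.floordiv_natCast (length.toNat+7) 8
      rw [hK, hfd, hmin]
      omega
    · have hmin : (out_.take length.toNat).length = 0 := by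
        simp only [List.length_take]
        omega
      have hfd : PySem.Int.floordiv (length+7) 8 < 1 := by
        rw [PySem.Int.floordiv_lt_iff_lt_mul (by norm_num)]
        omega
      rw [hK, hmin]
      omega
  rw [hKt]
  rw [refB_eq (out_.take length.toNat).length _ rfl]
  simp

-- ===== VERDICT (by name: the statement is the Claim_ definition above) =====
theorem merge_nums_spec : Claim_equal_merge_nums := by
  intro out_ length _ hpre
  show merge_nums out_ length = merge_nums_alt out_ length
  rw [A_eq_ref out_ length hpre, B_eq_ref out_ length hpre]
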